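-- pv_equiv track=rewrite | github.com/VeenaAHYadav/Cloud_Forensics | log_parser.py | parse_logs
-- ===== SOURCE A (Python) =====
-- def parse_logs(raw_logs):
--     cleaned = []
--
--     for log_block in raw_logs:
--         lines = log_block.split("\n")
--         for line in lines:
--             if line.strip():
--                 cleaned.append(line.strip())
--
--     return cleaned
-- ===== SOURCE B (Python) =====
-- def parse_logs(raw_logs):
--     # Streaming state machine: scan each block character by character, never
--     # calling split() or strip(). `cur` holds the stripped content of the
--     # current line so far; `pending` holds a run of whitespace seen after
--     # `cur` that becomes part of the line only if more content follows.
--     cleaned = []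
--     for block in raw_logs:
--         cur = ""
--         pending = ""
--         for c in block:
--             if c == "\n":
--                 if cur:
--                     cleaned.append(cur)
--                 cur = ""
--                 pending = ""
--             elif c.isspace():
--                 if cur:
--                     pending += c
--             else:
--                 cur += pending + c
--                 pending = ""
--         if cur:
--             cleaned.append(cur)
--     return cleaned
-- ===== Notes on version B (the rewrite author's own statement) =====
-- stated objective: alternative
-- what changed: Replaces A's split-then-strip passes with a single-pass character-level state machine that builds each stripped line incrementally (cur + pending-whitespace buffer) and emits it at newline/block end, never calling split or strip.
import Mathlib
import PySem

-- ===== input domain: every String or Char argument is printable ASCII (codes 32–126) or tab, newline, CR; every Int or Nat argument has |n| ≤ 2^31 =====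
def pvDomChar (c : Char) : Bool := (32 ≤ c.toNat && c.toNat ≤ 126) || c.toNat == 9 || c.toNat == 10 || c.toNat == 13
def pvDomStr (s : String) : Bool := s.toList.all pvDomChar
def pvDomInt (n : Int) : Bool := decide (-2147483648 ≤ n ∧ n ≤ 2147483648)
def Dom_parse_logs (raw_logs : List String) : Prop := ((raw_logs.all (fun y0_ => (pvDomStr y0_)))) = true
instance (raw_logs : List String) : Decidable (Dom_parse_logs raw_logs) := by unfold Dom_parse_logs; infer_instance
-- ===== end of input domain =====

-- B replaces A's split-then-strip passes with a single-pass character-level state machine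
-- (no split/strip calls); same output, a structurally different algorithm (no speed claim).

-- ===== PORT A =====
-- A: outer loop over blocks, per-block split on "\n", append each non-empty stripped line.
def parse_logs (raw_logs : List String) : List String :=
  raw_logs.foldl (fun cleaned log_block =>
    (PySem.Chars.splitOn log_block.toList ['\n']).foldl
      (fun c line =>
        if PySem.Chars.strip line ≠ [] then c ++ [String.ofList (PySem.Chars.strip line)] else c)
      cleaned) []

-- ===== PORT B =====
-- B: per-character state machine; state = (cleaned, cur, pending).
def pvStep (s : List String × List Char × List Char) (c : Char) :
    List String × List Char × List Char :=
  match s with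
  | (cl, cur, pending) =>
    if c = '\n' then
      ((if cur ≠ [] then cl ++ [String.ofList cur] else cl), [], [])
    else if PySem.Chars.isspace c then
      (cl, cur, if cur ≠ [] then pending ++ [c] else pending)
    else
      (cl, cur ++ pending ++ [c], [])

-- end-of-block finalisation: emit the current line if non-empty.
def pvFinish (s : List String × List Char × List Char) : List String :=
  if s.2.1 ≠ [] then s.1 ++ [String.ofList s.2.1] else s.1

def parse_logs_alt (raw_logs : List String) : List String :=
  raw_logs.foldl (fun cleaned block => pvFinish (block.toList.foldl pvStep (cleaned, [], []))) []

-- ===== PRECONDITION & SPEC =====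
def Spec_parse_logs (raw_logs : List String) (out : List String) : Prop := out = parse_logs_alt raw_logs
instance (raw_logs : List String) (out : List String) : Decidable (Spec_parse_logs raw_logs out) := by unfold Spec_parse_logs; infer_instance

-- ===== CLAIM (what is proved, stated in full; the proofs are below) =====
def Claim_equal_parse_logs : Prop := ∀ (raw_logs : List String), Dom_parse_logs raw_logs → Spec_parse_logs raw_logs (parse_logs raw_logs)

-- ===== LEMMAS AND PROOFS =====

-- PySem's fuel-based single-char split agrees with Mathlib's `List.splitOn` (loop invariant of `go`).
theorem go_splitOnP (fuel : Nat) (l cur : List Char) (acc : List (List Char))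
    (h : l.length ≤ fuel) :
    PySem.Chars.splitOn.go ['\n'] fuel l cur acc
      = acc.reverse ++ (List.splitOnP (· == '\n') l).modifyHead (cur.reverse ++ ·) := by
  induction fuel generalizing l cur acc with
  | zero =>
    have : l = [] := List.length_eq_zero_iff.mp (Nat.le_zero.mp h)
    subst this
    simp [PySem.Chars.splitOn.go, List.splitOnP_nil]
  | succ fuel ih =>
    cases l with
    | nil => simp [PySem.Chars.splitOn.go, List.splitOnP_nil]
    | cons c rest =>
      rw [PySem.Chars.splitOn.go]
      by_cases hc : c = '\n'
      · subst hc
        rw [if_pos (by simp [List.isPrefixOf])]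
        have hdrop : List.drop (['\n'].length) ('\n' :: rest) = rest := rfl
        rw [hdrop]
        rw [ih rest [] _ (Nat.le_of_succ_le_succ h)]
        simp only [List.splitOnP_cons, beq_self_eq_true, if_pos]
        cases hs : List.splitOnP (fun x => x == '\n') rest <;> simp
      · rw [if_neg (by simp [List.isPrefixOf, Ne.symm hc])]
        rw [ih rest (c :: cur) acc (Nat.le_of_succ_le_succ h)]
        obtain ⟨hd, tl, heq⟩ := List.exists_cons_of_ne_nil (List.splitOnP_ne_nil (· == '\n') rest)
        simp [List.splitOnP_cons, heq, hc]

theorem splitOn_bridge (cs : List Char) :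
    PySem.Chars.splitOn cs ['\n'] = cs.splitOn '\n' := by
  rw [PySem.Chars.splitOn, go_splitOnP _ _ _ _ (Nat.le_succ _)]
  obtain ⟨hd, tl, heq⟩ := List.exists_cons_of_ne_nil (List.splitOnP_ne_nil (· == '\n') cs)
  simp [List.splitOn, heq]

-- the non-empty stripped lines of a char list, as strings (shared result shape of both ports)
def pvEmit (cs : List Char) : List String :=
  (((cs.splitOn '\n').map PySem.Chars.strip).filter (· ≠ [])).map String.ofList

-- A's inner loop over one block's lines is a filtered map of the stripped lines
theorem a_inner (lines : List (List Char)) (c : List String) :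
    lines.foldl (fun c line =>
        if PySem.Chars.strip line ≠ [] then c ++ [String.ofList (PySem.Chars.strip line)] else c) c
      = c ++ ((lines.map PySem.Chars.strip).filter (· ≠ [])).map String.ofList := by
  induction lines generalizing c with
  | nil => simp
  | cons l rest ih =>
    by_cases hl : PySem.Chars.strip l = [] <;>
      simp only [List.foldl_cons, ne_eq, hl, not_true_eq_false, not_false_eq_true,
        ite_true, ite_false, List.map_cons, List.filter_cons, decide_true, decide_false] <;>
      rw [ih] <;> simp

-- state-abstraction functions: for a partial line l (no '\n'), the machine's cur is strip l and
-- pending is the trailing whitespace run of lstrip l.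
def pvCur (l : List Char) : List Char := PySem.Chars.strip l
def pvPend (l : List Char) : List Char :=
  ((PySem.Chars.lstrip l).reverse.takeWhile PySem.Chars.isspace).reverse

theorem lstrip_decomp (l : List Char) :
    PySem.Chars.lstrip l = pvCur l ++ pvPend l := by
  show PySem.Chars.lstrip l =
    (List.dropWhile PySem.Chars.isspace (PySem.Chars.lstrip l).reverse).reverse
      ++ (List.takeWhile PySem.Chars.isspace (PySem.Chars.lstrip l).reverse).reverse
  rw [← List.reverse_append, List.takeWhile_append_dropWhile, List.reverse_reverse]

theorem cur_nil_of_lstrip_nil {l : List Char} (h : PySem.Chars.lstrip l = []) :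
    pvCur l = [] := by
  simp [pvCur, PySem.Chars.strip, h, PySem.Chars.rstrip]

theorem pend_nil_of_lstrip_nil {l : List Char} (h : PySem.Chars.lstrip l = []) :
    pvPend l = [] := by
  simp [pvPend, h]

theorem cur_ne_nil_of_lstrip_cons {l : List Char} {a : Char} {as : List Char}
    (h : PySem.Chars.lstrip l = a :: as) : pvCur l ≠ [] := by
  have h' : List.dropWhile PySem.Chars.isspace l = a :: as := h
  have ha : PySem.Chars.isspace a = false := by
    have := List.head_dropWhile_not PySem.Chars.isspace (l := l) (by rw [h']; simp)
    simpa [h'] using this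
  simp only [pvCur, PySem.Chars.strip, PySem.Chars.rstrip, h]
  intro hc
  have : List.dropWhile PySem.Chars.isspace (as.reverse ++ [a]) = [] := by
    simpa [List.reverse_cons] using congrArg List.reverse hc
  rw [List.dropWhile_eq_nil_iff] at this
  have := this a (by simp)
  simp [ha] at this

-- one machine step on a non-newline char updates the abstracted state of the partial line
theorem step_inv (l : List Char) (c : Char) (hc : c ≠ '\n') (cl : List String) :
    pvStep (cl, pvCur l, pvPend l) c = (cl, pvCur (l ++ [c]), pvPend (l ++ [c])) := by
  have hdw : List.dropWhile PySem.Chars.isspace (l ++ [c])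
      = if (List.dropWhile PySem.Chars.isspace l).isEmpty
          then List.dropWhile PySem.Chars.isspace [c]
          else List.dropWhile PySem.Chars.isspace l ++ [c] := List.dropWhile_append
  by_cases hws : PySem.Chars.isspace c = true
  · cases hl : PySem.Chars.lstrip l with
    | nil =>
      have hl' : PySem.Chars.lstrip (l ++ [c]) = [] := by
        simp only [PySem.Chars.lstrip] at hl ⊢
        simp [hdw, hl, hws]
      simp [pvStep, hc, hws, cur_nil_of_lstrip_nil hl, pend_nil_of_lstrip_nil hl,
        cur_nil_of_lstrip_nil hl', pend_nil_of_lstrip_nil hl']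
    | cons a as =>
      have hl' : PySem.Chars.lstrip (l ++ [c]) = PySem.Chars.lstrip l ++ [c] := by
        simp only [PySem.Chars.lstrip] at hl ⊢
        simp [hdw, hl]
      have hcur : pvCur (l ++ [c]) = pvCur l := by
        simp [pvCur, PySem.Chars.strip, PySem.Chars.rstrip, hl', hws]
      have hpend : pvPend (l ++ [c]) = pvPend l ++ [c] := by
        simp [pvPend, hl', hws]
      simp [pvStep, hc, hws, hcur, hpend, cur_ne_nil_of_lstrip_cons hl]
  · cases hl : PySem.Chars.lstrip l with
    | nil =>
      have hl' : PySem.Chars.lstrip (l ++ [c]) = [c] := by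
        simp only [PySem.Chars.lstrip] at hl ⊢
        simp [hdw, hl, hws]
      have hcur : pvCur (l ++ [c]) = [c] := by
        simp [pvCur, PySem.Chars.strip, PySem.Chars.rstrip, hl', hws]
      have hpend : pvPend (l ++ [c]) = [] := by
        simp [pvPend, hl', hws]
      simp [pvStep, hc, hws, hcur, hpend, cur_nil_of_lstrip_nil hl, pend_nil_of_lstrip_nil hl]
    | cons a as =>
      have hws' : PySem.Chars.isspace c = false := by simpa using hws
      have hl' : PySem.Chars.lstrip (l ++ [c]) = PySem.Chars.lstrip l ++ [c] := by
        simp only [PySem.Chars.lstrip] at hl ⊢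
        simp [hdw, hl]
      have hcur : pvCur (l ++ [c]) = pvCur l ++ pvPend l ++ [c] := by
        have h1 : pvCur (l ++ [c]) = PySem.Chars.lstrip l ++ [c] := by
          simp [pvCur, PySem.Chars.strip, PySem.Chars.rstrip, hl', hws']
        rw [h1, lstrip_decomp l, List.append_assoc]
      have hpend : pvPend (l ++ [c]) = [] := by
        simp [pvPend, hl', hws']
      simp [pvStep, hc, hws, hcur, hpend]

-- running the machine over the rest of a block, from the state of partial line l,
-- finalising at the end, yields exactly the non-empty stripped lines
theorem runBlock (cs : List Char) (l : List Char) (cl : List String)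
    (hl : ∀ c ∈ l, ¬ (c == '\n') = true) :
    pvFinish (cs.foldl pvStep (cl, pvCur l, pvPend l)) = cl ++ pvEmit (l ++ cs) := by
  induction cs generalizing l cl with
  | nil =>
    have hsplit : l.splitOn '\n' = [l] := by
      simpa [List.splitOn] using
        List.splitOnP_eq_single (p := fun x => x == '\n') (xs := l) hl
    by_cases hcur : PySem.Chars.strip l = []
    · simp [pvFinish, pvEmit, hsplit, hcur, pvCur, List.append_nil]
    · simp [pvFinish, pvEmit, hsplit, hcur, pvCur, List.append_nil]
  | cons c cs ih =>
    rw [List.foldl_cons]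
    by_cases hc : c = '\n'
    · subst hc
      have hstep : pvStep (cl, pvCur l, pvPend l) '\n'
          = ((if pvCur l ≠ [] then cl ++ [String.ofList (pvCur l)] else cl),
             pvCur [], pvPend []) := by
        simp [pvStep, pvCur, pvPend, PySem.Chars.strip, PySem.Chars.lstrip, PySem.Chars.rstrip]
      rw [hstep, ih [] _ (by simp)]
      have hsplit : (l ++ '\n' :: cs).splitOn '\n' = l :: cs.splitOn '\n' := by
        simpa [List.splitOn] using
          List.splitOnP_first (p := fun x => x == '\n') (xs := l) hl '\n' (by simp) cs
      by_cases hcur : PySem.Chars.strip l = []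
      · have h2 : pvCur l = [] := hcur
        simp [pvEmit, hsplit, hcur, h2]
      · simp [pvEmit, hsplit, hcur, pvCur]
    · have hl' : ∀ x ∈ l ++ [c], ¬ (x == '\n') = true := by
        intro x hx
        rcases List.mem_append.mp hx with h | h
        · exact hl x h
        · simp at h
          simp [h, hc]
      rw [step_inv l c hc cl, ih (l ++ [c]) cl hl']
      simp

-- ===== VERDICT (by name: the statement is the Claim_ definition above) =====
theorem parse_logs_spec : Claim_equal_parse_logs := by
  intro raw_logs hdom
  clear hdom
  unfold Spec_parse_logs parse_logs parse_logs_alt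
  have hfun : ∀ (cl : List String) (b : String),
      pvFinish (b.toList.foldl pvStep (cl, [], []))
        = (PySem.Chars.splitOn b.toList ['\n']).foldl
            (fun c line =>
              if PySem.Chars.strip line ≠ [] then c ++ [String.ofList (PySem.Chars.strip line)] else c)
            cl := by
    intro cl b
    rw [splitOn_bridge, a_inner]
    have := runBlock b.toList [] cl (by simp)
    simpa [pvEmit, pvCur, pvPend] using this
  induction raw_logs using List.reverseRecOn with
  | nil => rfl
  | append_singleton xs x ih =>
    simp only [List.foldl_append, List.foldl_cons, List.foldl_nil]
    rw [ih, hfun]
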